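-- pv_equiv track=rewrite | github.com/slimsuite/SLiMSuite | libraries/rje.py | listCombos
-- ===== SOURCE A (Python) =====
-- def listCombos(inlist,maxrep=0): ### Returns a list of all possible combinations of inlist entries
--     '''
--     Returns a list of all possible combinations of inlist entries.
--     E.g. [AB,D,EF] will return [ [A,D,E], [A,D,F], [B,D,E], [B,D,F] ]
--     >> maxrep:int [0] = Max. no. repetitions of an individual element
--     '''
--     bases = [[]]
--     for el in inlist:
--         variants = []
--         for base in bases:
--             for var in el:
--                 if base.count(el) >= maxrep > 0: continue
--                 variants.append(base + [var])
--         bases = variants[0:]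
--     return bases
-- ===== SOURCE B (Python) =====
-- def listCombos(inlist, maxrep=0):
--     '''Recursive Cartesian product of the variant groups; same pruning guard as A.'''
--     def go(i, base):
--         if i == len(inlist):
--             return [base]
--         el = inlist[i]
--         if maxrep > 0 and base.count(el) >= maxrep:
--             return []
--         out = []
--         for var in el:
--             out += go(i + 1, base + [var])
--         return out
--     return go(0, [])
-- ===== Notes on version B (the rewrite author's own statement) =====
-- stated objective: alternative
-- what changed: Replaces A's breadth-first loop that rebuilds the whole list of partial combinations for every group with a depth-first recursion extending one partial combination at a time (the pruning guard is hoisted out of the variant loop since it does not depend on the variant).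
import Mathlib
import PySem

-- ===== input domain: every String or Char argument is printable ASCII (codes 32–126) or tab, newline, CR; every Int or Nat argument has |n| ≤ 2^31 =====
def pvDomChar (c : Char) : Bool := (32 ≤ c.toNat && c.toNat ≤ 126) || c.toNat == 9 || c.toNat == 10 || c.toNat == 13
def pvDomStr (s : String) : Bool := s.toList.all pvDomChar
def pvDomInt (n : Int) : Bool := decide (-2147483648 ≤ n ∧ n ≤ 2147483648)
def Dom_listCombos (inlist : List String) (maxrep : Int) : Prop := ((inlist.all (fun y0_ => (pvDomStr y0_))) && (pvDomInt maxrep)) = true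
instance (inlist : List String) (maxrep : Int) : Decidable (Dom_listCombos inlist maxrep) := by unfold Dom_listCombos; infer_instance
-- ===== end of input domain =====

-- B replaces A's breadth-first loop that rebuilds the whole list of partial combinations
-- for every group by a depth-first recursion extending one partial combination at a time
-- (alternative decomposition, same results).

-- ===== PORT A =====
def listCombos (inlist : List String) (maxrep : Int) : List (List String) :=
  inlist.foldl (fun bases el =>
    bases.foldl (fun variants base =>
      el.toList.foldl (fun variants var =>
        if (PySem.List.count base el : Int) ≥ maxrep ∧ maxrep > 0 then variants
        else variants ++ [base ++ [String.ofList [var]]]) variants) []) [[]]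

-- ===== PORT B =====
def listCombosGo (maxrep : Int) : List String → List String → List (List String)
  | [], base => [base]
  | el :: rest, base =>
      if maxrep > 0 ∧ (PySem.List.count base el : Int) ≥ maxrep then []
      else el.toList.foldl (fun out var => out ++ listCombosGo maxrep rest (base ++ [String.ofList [var]])) []

def listCombos_alt (inlist : List String) (maxrep : Int) : List (List String) :=
  listCombosGo maxrep inlist []

-- ===== PRECONDITION & SPEC =====
def Spec_listCombos (inlist : List String) (maxrep : Int) (out : List (List String)) : Prop := out = listCombos_alt inlist maxrep
instance (inlist : List String) (maxrep : Int) (out : List (List String)) : Decidable (Spec_listCombos inlist maxrep out) := by unfold Spec_listCombos; infer_instance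

-- ===== CLAIM (what is proved, stated in full; the proofs are below) =====
def Claim_equal_listCombos : Prop := ∀ (inlist : List String) (maxrep : Int), Dom_listCombos inlist maxrep → Spec_listCombos inlist maxrep (listCombos inlist maxrep)

-- ===== LEMMAS AND PROOFS =====

-- A's innermost loop over the characters of `el`, for one fixed base.
theorem listCombos_inner (maxrep : Int) (el : String) (base : List String)
    (acc : List (List String)) :
    el.toList.foldl (fun variants var =>
      if (PySem.List.count base el : Int) ≥ maxrep ∧ maxrep > 0 then variants
      else variants ++ [base ++ [String.ofList [var]]]) acc
    = acc ++ (if maxrep > 0 ∧ (PySem.List.count base el : Int) ≥ maxrep then []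
              else el.toList.map (fun var => base ++ [String.ofList [var]])) := by
  by_cases h : (PySem.List.count base el : Int) ≥ maxrep ∧ maxrep > 0
  · simp only [if_pos h, if_pos (And.intro h.2 h.1)]
    induction el.toList generalizing acc with
    | nil => simp
    | cons c cs ih => simp [List.foldl_cons, ih]
  · have h' : ¬ (maxrep > 0 ∧ (PySem.List.count base el : Int) ≥ maxrep) := by
      intro hc; exact h ⟨hc.2, hc.1⟩
    simp only [if_neg h, if_neg h']
    exact PySem.List.foldl_append_singleton_eq_map _ _ _

-- B's recursion, expressed as a flatMap over the characters when not pruned.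
theorem listCombosGo_cons (maxrep : Int) (el : String) (rest base : List String) :
    listCombosGo maxrep (el :: rest) base
    = if maxrep > 0 ∧ (PySem.List.count base el : Int) ≥ maxrep then []
      else (el.toList.map (fun var => base ++ [String.ofList [var]])).flatMap
             (listCombosGo maxrep rest) := by
  rw [listCombosGo]
  split_ifs with h
  · rfl
  · rw [PySem.List.foldl_append_eq_flatMap]
    simp [List.flatMap_map]

-- Main invariant: A's fold starting from any list of bases computes the
-- concatenation of B's depth-first expansions of those bases.
theorem listCombos_fold_eq (maxrep : Int) (inlist : List String)
    (bases : List (List String)) :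
    inlist.foldl (fun bases el =>
      bases.foldl (fun variants base =>
        el.toList.foldl (fun variants var =>
          if (PySem.List.count base el : Int) ≥ maxrep ∧ maxrep > 0 then variants
          else variants ++ [base ++ [String.ofList [var]]]) variants) []) bases
    = bases.flatMap (listCombosGo maxrep inlist) := by
  induction inlist generalizing bases with
  | nil => simp [listCombosGo]
  | cons el rest ih =>
    rw [List.foldl_cons, ih]
    have hstep : bases.foldl (fun variants base =>
        el.toList.foldl (fun variants var =>
          if (PySem.List.count base el : Int) ≥ maxrep ∧ maxrep > 0 then variants
          else variants ++ [base ++ [String.ofList [var]]]) variants) []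
        = bases.flatMap (fun base =>
            if maxrep > 0 ∧ (PySem.List.count base el : Int) ≥ maxrep then []
            else el.toList.map (fun var => base ++ [String.ofList [var]])) := by
      have := PySem.List.foldl_append_eq_flatMap
        (g := fun base =>
          if maxrep > 0 ∧ (PySem.List.count base el : Int) ≥ maxrep then []
          else el.toList.map (fun var => base ++ [String.ofList [var]]))
        (l := bases) (acc := [])
      simp only [List.nil_append] at this
      rw [← this]
      exact PySem.List.foldl_congr_mem _ _ _ _ (fun acc base _ => listCombos_inner maxrep el base acc)
    rw [hstep, List.flatMap_assoc]
    apply List.flatMap_congr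
    intro base _
    rw [listCombosGo_cons]
    split_ifs with h <;> simp

-- ===== VERDICT (by name: the statement is the Claim_ definition above) =====
theorem listCombos_spec : Claim_equal_listCombos := by
  intro inlist maxrep _
  show listCombos inlist maxrep = listCombos_alt inlist maxrep
  rw [listCombos, listCombos_alt, listCombos_fold_eq]
  simp
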